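-- pv_equiv track=rewrite | github.com/XaicuL/6.1200J | Week 3/ps/ps4.py | part_b_noisy
-- ===== SOURCE A (Python) =====
-- SECRET_VALUE = 42
--
-- def part_b_noisy(n_lim, k_lim):
--     # Noise: Shadow limits
--     n_limit = n_lim
--     k_limit = k_lim
--     accumulated_total = 0
--
--     for i in range(1, n_limit + 1):
--         for j in range(1, k_limit + 1):
--             # Noise: Intermediate calculation inside inner loop
--             inner_term = 3 * j - i
--             accumulated_total += inner_term
--
--     # Noise: Useless post-calculation
--     _ = (n_limit * k_limit) % SECRET_VALUE
--
--     return accumulated_total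
-- ===== SOURCE B (Python) =====
-- SECRET_VALUE = 42
--
-- def part_b_noisy(n_lim, k_lim):
--     # Closed form: sum over i in 1..n, j in 1..k of (3j - i)
--     n = max(n_lim, 0)
--     k = max(k_lim, 0)
--     return n * (3 * k * (k + 1) // 2) - k * (n * (n + 1) // 2)
-- ===== Notes on version B (the rewrite author's own statement) =====
-- stated objective: faster
-- what changed: Replaced the double loop over i,j by the closed-form Gauss-sum formula n*(3*k*(k+1)//2) - k*(n*(n+1)//2) with negative limits clamped to 0.
import Mathlib
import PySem

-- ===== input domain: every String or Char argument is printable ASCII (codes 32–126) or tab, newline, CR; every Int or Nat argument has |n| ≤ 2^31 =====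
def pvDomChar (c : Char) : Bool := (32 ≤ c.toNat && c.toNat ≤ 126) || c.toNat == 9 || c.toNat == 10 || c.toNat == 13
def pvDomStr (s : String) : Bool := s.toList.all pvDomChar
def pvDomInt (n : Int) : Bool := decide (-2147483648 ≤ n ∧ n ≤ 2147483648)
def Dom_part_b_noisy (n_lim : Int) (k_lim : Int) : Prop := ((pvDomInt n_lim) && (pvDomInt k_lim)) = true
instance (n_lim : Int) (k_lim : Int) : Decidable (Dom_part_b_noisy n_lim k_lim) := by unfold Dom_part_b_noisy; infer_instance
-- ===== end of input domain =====

-- B replaces the O(n*k) double loop by the O(1) closed-form Gauss-sum formula (faster, asymptotic).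


-- ===== PORT A =====
def part_b_noisy (n_lim : Int) (k_lim : Int) : Int :=
  let n_limit := n_lim
  let k_limit := k_lim
  let accumulated_total : Int := 0
  (PySem.List.pyRange 1 (n_limit + 1) 1).foldl (fun acc i =>
    (PySem.List.pyRange 1 (k_limit + 1) 1).foldl (fun acc2 j =>
      let inner_term := 3 * j - i
      acc2 + inner_term) acc) accumulated_total

-- ===== PORT B =====
def part_b_noisy_alt (n_lim : Int) (k_lim : Int) : Int :=
  let n := max n_lim 0
  let k := max k_lim 0
  n * PySem.Int.floordiv (3 * k * (k + 1)) 2 - k * PySem.Int.floordiv (n * (n + 1)) 2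

-- ===== PRECONDITION & SPEC =====
def Spec_part_b_noisy (n_lim : Int) (k_lim : Int) (out : Int) : Prop := out = part_b_noisy_alt n_lim k_lim
instance (n_lim : Int) (k_lim : Int) (out : Int) : Decidable (Spec_part_b_noisy n_lim k_lim out) := by unfold Spec_part_b_noisy; infer_instance

-- ===== CLAIM (what is proved, stated in full; the proofs are below) =====
def Claim_equal_part_b_noisy : Prop := ∀ (n_lim : Int) (k_lim : Int), Dom_part_b_noisy n_lim k_lim → Spec_part_b_noisy n_lim k_lim (part_b_noisy n_lim k_lim)

-- ===== LEMMAS AND PROOFS =====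

/-- Triangular numbers, defined recursively for induction. -/
def pvTri : Nat → Int
  | 0 => 0
  | Nat.succ m => pvTri m + (m + 1)

lemma pvTri_double (m : Nat) : 2 * pvTri m = (m : Int) * (m + 1) := by
  induction m with
  | zero => simp [pvTri]
  | succ m ih => simp only [pvTri]; push_cast; linarith

lemma pv_inner (K : Nat) (i acc : Int) :
    ((List.range K).map (fun t : Nat => (1 : Int) + t)).foldl
      (fun acc2 j => acc2 + (3 * j - i)) acc
    = acc + 3 * pvTri K - (K : Int) * i := by
  induction K generalizing acc with
  | zero => simp [pvTri]
  | succ m ih =>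
    rw [List.range_succ, List.map_append, List.foldl_append, ih]
    simp only [List.map_cons, List.map_nil, List.foldl_cons, List.foldl_nil, pvTri]
    push_cast; ring

lemma pv_outer (N : Nat) (k acc : Int) :
    ((List.range N).map (fun t : Nat => (1 : Int) + t)).foldl
      (fun acc i => (PySem.List.pyRange 1 (k + 1) 1).foldl
        (fun acc2 j => acc2 + (3 * j - i)) acc) acc
    = acc + (N : Int) * (3 * pvTri k.toNat) - (k.toNat : Int) * pvTri N := by
  induction N generalizing acc with
  | zero => simp [pvTri]
  | succ m ih =>
    rw [List.range_succ, List.map_append, List.foldl_append, ih]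
    simp only [List.map_cons, List.map_nil, List.foldl_cons, List.foldl_nil]
    rw [PySem.List.pyRange_one, show (k + 1 - 1) = k by ring, pv_inner]
    simp only [pvTri]
    push_cast; ring

lemma pv_floordiv_tri (m : Nat) (c : Int) :
    PySem.Int.floordiv (c * m * (m + 1)) 2 = c * pvTri m := by
  rw [PySem.Int.floordiv_eq_ediv_of_pos (by norm_num)]
  rw [show c * (m : Int) * (m + 1) = (c * pvTri m) * 2 by
    linear_combination -c * pvTri_double m]
  exact Int.mul_ediv_cancel _ (by norm_num)

-- ===== VERDICT (by name: the statement is the Claim_ definition above) =====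
theorem part_b_noisy_spec : Claim_equal_part_b_noisy := by
  intro n k _
  unfold Spec_part_b_noisy part_b_noisy part_b_noisy_alt
  simp only
  rw [PySem.List.pyRange_one 1 (n + 1), show (n + 1 - 1) = n by ring, pv_outer]
  rw [← Int.toNat_eq_max n, ← Int.toNat_eq_max k]
  rw [pv_floordiv_tri k.toNat 3,
      show ((n.toNat : Int)) * ((n.toNat : Int) + 1) = 1 * (n.toNat : Int) * ((n.toNat : Int) + 1) by ring]
  rw [pv_floordiv_tri n.toNat 1]
  ring
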